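-- pv_equiv track=rewrite | github.com/SohamRatnaparkhi/practise | code studios/arrays/xorQueries.py | xorQuery
-- ===== SOURCE A (Python) =====
-- def xorQuery(queries):
--     # Write your code here.
--     arr = []
--     l = 0
--     for q in queries:
--         if q[0] == 1:
--             arr.append(q[1])
--             l += 1
--         else:
--             for x in range(l):
--                 arr[x] ^= q[1]
--     return arr
--
--     pass
-- ===== SOURCE B (Python) =====
-- def xorQuery(queries):
--     # Track a running cumulative XOR instead of rewriting the array:
--     # store v ^ c at insert time, undo with the final cumulative at the end.
--     arr = []
--     c = 0
--     for q in queries: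
--         if q[0] == 1:
--             arr.append(q[1] ^ c)
--         else:
--             c ^= q[1]
--     return [v ^ c for v in arr]
-- ===== Notes on version B (the rewrite author's own statement) =====
-- stated objective: alternative
-- what changed: Replaces A's per-update rewrite of the whole array with a running cumulative XOR: inserts store v^c and one final pass undoes the cumulative, so the inner loop over the array disappears.
-- outside the precondition, e.g. on xorQuery([[2]]): A returns [], B raises IndexError
import Mathlib
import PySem

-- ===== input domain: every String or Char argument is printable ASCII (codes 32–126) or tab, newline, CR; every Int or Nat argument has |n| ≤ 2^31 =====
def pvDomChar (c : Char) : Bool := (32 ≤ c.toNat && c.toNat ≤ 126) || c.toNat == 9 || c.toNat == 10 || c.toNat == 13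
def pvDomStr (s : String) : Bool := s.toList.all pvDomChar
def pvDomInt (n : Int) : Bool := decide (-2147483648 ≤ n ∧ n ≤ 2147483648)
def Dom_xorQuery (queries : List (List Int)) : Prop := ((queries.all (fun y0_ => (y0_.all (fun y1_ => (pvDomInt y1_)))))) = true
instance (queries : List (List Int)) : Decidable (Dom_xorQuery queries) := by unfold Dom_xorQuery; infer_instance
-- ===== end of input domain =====

-- B replaces A's per-update in-place rewrite of the whole array by a running
-- cumulative XOR: inserts store v^c and one final pass undoes the cumulative.

-- ===== PORT A =====
-- one iteration of A's outer 'for q in queries' loop over state (arr, l)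
def pvStepA (st : List Int × Int) (q : List Int) : List Int × Int :=
  if PySem.List.pyGetD q 0 0 = 1 then
    (st.1 ++ [PySem.List.pyGetD q 1 0], st.2 + 1)
  else
    ((PySem.List.pyRange 0 st.2 1).foldl
       (fun a x => PySem.List.pySetD a x (PySem.Int.bxor (PySem.List.pyGetD a x 0) (PySem.List.pyGetD q 1 0)))
       st.1,
     st.2)

def xorQuery (queries : List (List Int)) : List Int :=
  (queries.foldl pvStepA ([], 0)).1

-- ===== PORT B =====
-- one iteration of B's loop over state (arr, c)
def pvStepB (st : List Int × Int) (q : List Int) : List Int × Int :=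
  if PySem.List.pyGetD q 0 0 = 1 then
    (st.1 ++ [PySem.Int.bxor (PySem.List.pyGetD q 1 0) st.2], st.2)
  else
    (st.1, PySem.Int.bxor st.2 (PySem.List.pyGetD q 1 0))

def xorQuery_alt (queries : List (List Int)) : List Int :=
  let st := queries.foldl pvStepB ([], 0)
  st.1.map (fun v => PySem.Int.bxor v st.2)

-- ===== PRECONDITION & SPEC =====
-- Pre_ excludes queries with fewer than 2 elements: on those A raises IndexError,
-- except in the corner where a short non-insert query arrives while the array is
-- still empty (A returns, ignoring it); B's natural code raises IndexError there.
def Pre_xorQuery (queries : List (List Int)) : Prop :=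
  ∀ q ∈ queries, 2 ≤ q.length

instance (queries : List (List Int)) : Decidable (Pre_xorQuery queries) := by
  unfold Pre_xorQuery; infer_instance

def pvWitness_xorQuery : List (List Int) := [[1, 2], [2, 3], [1, 5]]

def Spec_xorQuery (queries : List (List Int)) (out : List Int) : Prop := out = xorQuery_alt queries
instance (queries : List (List Int)) (out : List Int) : Decidable (Spec_xorQuery queries out) := by unfold Spec_xorQuery; infer_instance

-- ===== CLAIM (what is proved, stated in full; the proofs are below) =====
def Claim_equal_xorQuery : Prop := ∀ (queries : List (List Int)), Dom_xorQuery queries → Pre_xorQuery queries → Spec_xorQuery queries (xorQuery queries)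

-- ===== LEMMAS AND PROOFS =====

-- a small sign/bits encoding of Int to reason about PySem.Int.bxor
def pvBits (a : Int) : Nat := if 0 ≤ a then a.toNat else (-a).toNat - 1
def pvDec (s : Bool) (n : Nat) : Int := if s then -(n : Int) - 1 else (n : Int)

theorem pvDec_sgn_bits (a : Int) : pvDec (decide (a < 0)) (pvBits a) = a := by
  unfold pvDec pvBits
  by_cases h : 0 ≤ a
  · simp [h, show ¬ a < 0 from by omega]
  · simp [h, show a < 0 from by omega]

theorem pvSgn_dec (s : Bool) (n : Nat) : decide (pvDec s n < 0) = s := by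
  cases s <;> simp [pvDec] <;> omega

theorem pvBits_dec (s : Bool) (n : Nat) : pvBits (pvDec s n) = n := by
  cases s <;> simp [pvDec, pvBits] <;> split_ifs <;> omega

theorem pvBxor_eq (a b : Int) :
    PySem.Int.bxor a b = pvDec (xor (decide (a < 0)) (decide (b < 0))) (pvBits a ^^^ pvBits b) := by
  unfold PySem.Int.bxor pvDec pvBits
  by_cases ha : 0 ≤ a <;> by_cases hb : 0 ≤ b <;>
    simp [ha, hb] <;> omega

theorem pvBxor_assoc (a b c : Int) :
    PySem.Int.bxor (PySem.Int.bxor a b) c = PySem.Int.bxor a (PySem.Int.bxor b c) := by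
  rw [pvBxor_eq a b, pvBxor_eq b c, pvBxor_eq (pvDec _ _) c, pvBxor_eq a (pvDec _ _),
      pvSgn_dec, pvBits_dec, pvSgn_dec, pvBits_dec, Bool.xor_assoc, Nat.xor_assoc]

theorem pvBxor_cancel (a b : Int) :
    PySem.Int.bxor (PySem.Int.bxor a b) b = a := by
  rw [pvBxor_eq a b, pvBxor_eq (pvDec _ _) b, pvSgn_dec, pvBits_dec,
      show ∀ (s t : Bool), xor (xor s t) t = s from by decide,
      Nat.xor_assoc, Nat.xor_self, Nat.xor_zero, pvDec_sgn_bits]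

-- A's inner 'for x in range(l)' loop XORs v into every slot of the array
theorem pvInner (v : Int) : ∀ (post pre : List Int),
    (PySem.List.pyRange (pre.length : Int) ((pre.length + post.length : Nat) : Int) 1).foldl
        (fun a x => PySem.List.pySetD a x (PySem.Int.bxor (PySem.List.pyGetD a x 0) v))
        (pre ++ post)
      = pre ++ post.map (fun w => PySem.Int.bxor w v) := by
  intro post
  induction post with
  | nil =>
    intro pre
    simp [PySem.List.pyRange_one_eq_nil (le_refl _)]
  | cons h t ih =>
    intro pre
    have hlt : (pre.length : Int) < ((pre.length + (h :: t).length : Nat) : Int) := by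
      simp only [List.length_cons]
      push_cast
      omega
    rw [PySem.List.pyRange_one_cons hlt, List.foldl_cons]
    have hget : PySem.List.pyGetD (pre ++ h :: t) (pre.length : Int) 0 = h := by simp
    have hset : PySem.List.pySetD (pre ++ h :: t) (pre.length : Int) (PySem.Int.bxor h v)
        = (pre ++ [PySem.Int.bxor h v]) ++ t := by simp
    rw [hget, hset]
    have h1 : ((pre.length : Int) + 1) = (((pre ++ [PySem.Int.bxor h v]).length : Nat) : Int) := by
      simp
    have h2 : ((pre.length + (h :: t).length : Nat) : Int)
        = (((pre ++ [PySem.Int.bxor h v]).length + t.length : Nat) : Int) := by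
      simp; omega
    rw [h1, h2, ih (pre ++ [PySem.Int.bxor h v])]
    simp

-- the loop invariant tying A's state (arr, l) to B's state (arr', c):
-- arr = arr'.map (· ^ c) and l = |arr'|
theorem pvInv : ∀ (qs : List (List Int)) (b : List Int) (c : Int),
    qs.foldl pvStepA (b.map (fun w => PySem.Int.bxor w c), (b.length : Int))
      = ((qs.foldl pvStepB (b, c)).1.map (fun w => PySem.Int.bxor w (qs.foldl pvStepB (b, c)).2),
         ((qs.foldl pvStepB (b, c)).1.length : Int)) := by
  intro qs
  induction qs with
  | nil => intro b c; rfl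
  | cons q qs ih =>
    intro b c
    rw [List.foldl_cons, List.foldl_cons]
    by_cases hq : PySem.List.pyGetD q 0 0 = 1
    · -- insert branch
      have hA : pvStepA (b.map (fun w => PySem.Int.bxor w c), (b.length : Int)) q
          = ((b ++ [PySem.Int.bxor (PySem.List.pyGetD q 1 0) c]).map (fun w => PySem.Int.bxor w c),
             ((b ++ [PySem.Int.bxor (PySem.List.pyGetD q 1 0) c]).length : Int)) := by
        simp [pvStepA, hq, pvBxor_cancel]
      have hB : pvStepB (b, c) q = (b ++ [PySem.Int.bxor (PySem.List.pyGetD q 1 0) c], c) := by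
        simp [pvStepB, hq]
      rw [hA, hB, ih]
    · -- global-xor branch
      have hA : pvStepA (b.map (fun w => PySem.Int.bxor w c), (b.length : Int)) q
          = (b.map (fun w => PySem.Int.bxor w (PySem.Int.bxor c (PySem.List.pyGetD q 1 0))),
             (b.length : Int)) := by
        have hinner := pvInner (PySem.List.pyGetD q 1 0) (b.map (fun w => PySem.Int.bxor w c)) []
        simp only [List.length_nil, List.nil_append, Nat.zero_add, List.length_map, Nat.cast_zero] at hinner
        simp [pvStepA, hq, hinner, List.map_map, Function.comp, pvBxor_assoc]
      have hB : pvStepB (b, c) q = (b, PySem.Int.bxor c (PySem.List.pyGetD q 1 0)) := by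
        simp [pvStepB, hq]
      rw [hA, hB, ih]

-- ===== VERDICT (by name: the statement is the Claim_ definition above) =====
theorem xorQuery_spec : Claim_equal_xorQuery := by
  intro queries _ _
  unfold Spec_xorQuery xorQuery xorQuery_alt
  have h := pvInv queries [] 0
  simp only [List.map_nil, List.length_nil, Nat.cast_zero] at h
  rw [h]
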